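-- pv_equiv track=rewrite | github.com/AlexanderGitHubTest/Recursion | 04_is_string_palindrome.py | is_string_palindrome
-- ===== SOURCE A (Python) =====
-- def remove_nonalphabetic_char_on_left(string: str) -> str:
--     if not string[:1].isalpha() and len(string) > 0:
--         return remove_nonalphabetic_char_on_left(string[1:])
--     return string
--
-- def remove_nonalphabetic_char_on_right(string: str) -> str:
--     if not string[-1:].isalpha() and len(string) > 0:
--         return remove_nonalphabetic_char_on_right(string[:-1])
--     return string
--
-- def is_string_palindrome(string: str) -> bool:
--     string = remove_nonalphabetic_char_on_left(string)
--     string = remove_nonalphabetic_char_on_right(string)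
--     if len(string) == 0 or len(string) == 1:
--         return True
--     return (    string[0].lower() == string[-1].lower()
--             and is_string_palindrome(string[1:-1])
--            )
-- ===== SOURCE B (Python) =====
-- def is_string_palindrome(string: str) -> bool:
--     s = [c.lower() for c in string if c.isalpha()]
--     return s == s[::-1]
-- ===== Notes on version B (the rewrite author's own statement) =====
-- stated objective: faster
-- what changed: B filters the alphabetic characters once, lowercases them, and compares the list with its reverse, replacing A's recursive end-stripping/slicing (which copies the string at every step) with a single linear pass.
import Mathlib
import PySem

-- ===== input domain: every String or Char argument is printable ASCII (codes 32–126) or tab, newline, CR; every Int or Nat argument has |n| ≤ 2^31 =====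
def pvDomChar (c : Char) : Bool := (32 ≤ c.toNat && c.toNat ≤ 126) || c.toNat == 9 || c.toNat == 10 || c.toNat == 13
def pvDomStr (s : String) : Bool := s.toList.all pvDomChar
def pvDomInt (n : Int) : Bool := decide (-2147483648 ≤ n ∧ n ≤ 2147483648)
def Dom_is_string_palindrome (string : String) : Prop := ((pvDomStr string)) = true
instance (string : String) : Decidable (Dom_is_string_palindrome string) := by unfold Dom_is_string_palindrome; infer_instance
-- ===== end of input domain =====

-- B replaces A's recursive end-stripping/slicing with a single pass that filters the
-- alphabetic characters, lowercases them, and compares the list with its reverse.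

-- ===== PORT A =====
-- (pvRmLeft/pvRmRight port the two helpers on the underlying character list; the two
--  length lemmas and pvRmRight_some are cited by the termination proofs of the ports.)

def pvRmLeft : List Char → List Char
  | [] => []
  | c :: cs => if ¬ PySem.Chars.isalpha c then pvRmLeft cs else c :: cs

def pvRmRight (cs : List Char) : List Char :=
  match h : cs.getLast? with
  | none => cs
  | some c => if ¬ PySem.Chars.isalpha c then pvRmRight cs.dropLast else cs
termination_by cs.length
decreasing_by
  cases cs with
  | nil => simp at h
  | cons a as => simp [List.length_dropLast]

theorem pvRmRight_some (cs : List Char) (c : Char) (h : cs.getLast? = some c) :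
    pvRmRight cs = if ¬ PySem.Chars.isalpha c then pvRmRight cs.dropLast else cs := by
  rw [pvRmRight, h]

theorem pvRmLeft_length_le (cs : List Char) : (pvRmLeft cs).length ≤ cs.length := by
  induction cs with
  | nil => simp [pvRmLeft]
  | cons c cs ih =>
      simp only [pvRmLeft]
      split
      · exact Nat.le_succ_of_le ih
      · simp

theorem pvRmRight_length_le (cs : List Char) : (pvRmRight cs).length ≤ cs.length := by
  induction cs using pvRmRight.induct with
  | case1 cs h => rw [pvRmRight, h]
  | case2 cs c h hc ih =>
      rw [pvRmRight_some cs c h, if_pos hc]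
      have := cs.length_dropLast
      omega
  | case3 cs c h hc => rw [pvRmRight_some cs c h, if_neg hc]

def pvPalA (cs : List Char) : Bool :=
  let s := pvRmRight (pvRmLeft cs)
  if s.length = 0 ∨ s.length = 1 then true
  else
    match s with
    | [] => true
    | a :: t =>
        (PySem.Chars.lowerChar a == PySem.Chars.lowerChar (t.getLastD a))
          && pvPalA (s.drop 1).dropLast
termination_by cs.length
decreasing_by
  have h1 := pvRmLeft_length_le cs
  have h2 := pvRmRight_length_le (pvRmLeft cs)
  have hs : pvRmRight (pvRmLeft cs) = s := rfl
  rw [hs] at h2 ⊢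
  simp only [List.length_dropLast, List.length_drop]
  omega


def is_string_palindrome (string : String) : Bool := pvPalA string.toList

-- ===== PORT B =====
-- Source B: s = [c.lower() for c in string if c.isalpha()]; return s == s[::-1]
def is_string_palindrome_alt (string : String) : Bool :=
  let s := (string.toList.filter PySem.Chars.isalpha).map PySem.Chars.lowerChar
  s == s.reverse

-- ===== PRECONDITION & SPEC =====
def Spec_is_string_palindrome (string : String) (out : Bool) : Prop := out = is_string_palindrome_alt string
instance (string : String) (out : Bool) : Decidable (Spec_is_string_palindrome string out) := by unfold Spec_is_string_palindrome; infer_instance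

-- ===== CLAIM (what is proved, stated in full; the proofs are below) =====
def Claim_equal_is_string_palindrome : Prop := ∀ (string : String), Dom_is_string_palindrome string → Spec_is_string_palindrome string (is_string_palindrome string)

-- ===== LEMMAS AND PROOFS =====
-- pvClean cs is B's cleaned list: the lowercased alphabetic characters of cs.
def pvClean (cs : List Char) : List Char :=
  (cs.filter PySem.Chars.isalpha).map PySem.Chars.lowerChar

theorem pvClean_rmLeft (cs : List Char) : pvClean (pvRmLeft cs) = pvClean cs := by
  induction cs with
  | nil => rfl
  | cons c cs ih =>
      simp only [pvRmLeft]
      split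
      · next h => simp only [pvClean, List.filter_cons] at *; simp_all
      · rfl

theorem pvRmLeft_head_alpha (cs : List Char) (a : Char) (t : List Char)
    (h : pvRmLeft cs = a :: t) : PySem.Chars.isalpha a = true := by
  induction cs with
  | nil => simp [pvRmLeft] at h
  | cons c cs ih =>
      simp only [pvRmLeft] at h
      split at h
      · exact ih h
      · next hc => cases h; simpa using hc

theorem pvRmRight_prefix (cs : List Char) : (pvRmRight cs).IsPrefix cs := by
  induction cs using pvRmRight.induct with
  | case1 cs h => rw [pvRmRight, h]
  | case2 cs c h hc ih =>
      rw [pvRmRight_some cs c h, if_pos hc]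
      exact ih.trans cs.dropLast_prefix
  | case3 cs c h hc => rw [pvRmRight_some cs c h, if_neg hc]

theorem pvClean_append (xs ys : List Char) :
    pvClean (xs ++ ys) = pvClean xs ++ pvClean ys := by
  simp [pvClean, List.filter_append]

theorem pvClean_rmRight (cs : List Char) : pvClean (pvRmRight cs) = pvClean cs := by
  induction cs using pvRmRight.induct with
  | case1 cs h => rw [pvRmRight, h]
  | case2 cs c h hc ih =>
      rw [pvRmRight_some cs c h, if_pos hc, ih]
      conv_rhs => rw [← List.dropLast_append_getLast? c h]
      rw [pvClean_append]
      simp only [Bool.not_eq_true] at hc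
      simp [pvClean, List.filter_cons, hc]
  | case3 cs c h hc => rw [pvRmRight_some cs c h, if_neg hc]

theorem pvRmRight_last_alpha (cs : List Char) (c : Char)
    (h : (pvRmRight cs).getLast? = some c) : PySem.Chars.isalpha c = true := by
  induction cs using pvRmRight.induct with
  | case1 cs hl => rw [pvRmRight, hl] at h; rw [hl] at h; simp at h
  | case2 cs d hl hd ih =>
      rw [pvRmRight_some cs d hl, if_pos hd] at h
      exact ih h
  | case3 cs d hl hd =>
      rw [pvRmRight_some cs d hl, if_neg hd] at h
      rw [hl] at h
      cases h
      exact not_not.mp hd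

theorem pvClean_len_le (cs : List Char) : (pvClean cs).length ≤ cs.length := by
  simp only [pvClean, List.length_map]
  exact cs.length_filter_le _

theorem pvPalindrome_short (s : List Char) (h : s.length ≤ 1) : s = s.reverse := by
  match s, h with
  | [], _ => rfl
  | [a], _ => rfl

theorem pvClean_cons (c : Char) (cs : List Char) (h : PySem.Chars.isalpha c = true) :
    pvClean (c :: cs) = PySem.Chars.lowerChar c :: pvClean cs := by
  simp [pvClean, List.filter_cons, h]

theorem pvPal_cons_concat (x y : Char) (u : List Char) :
    (x :: (u ++ [y]) = (x :: (u ++ [y])).reverse) ↔ (x = y ∧ u = u.reverse) := by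
  have hrev : (x :: (u ++ [y])).reverse = y :: (u.reverse ++ [x]) := by simp
  rw [hrev]
  constructor
  · intro hh
    rw [List.cons.injEq] at hh
    obtain ⟨rfl, h2⟩ := hh
    exact ⟨rfl, List.append_cancel_right h2⟩
  · rintro ⟨rfl, hu⟩
    rw [List.cons.injEq]
    exact ⟨rfl, by rw [← hu]⟩

theorem pvMain (cs : List Char) : pvPalA cs = true ↔ pvClean cs = (pvClean cs).reverse := by
  induction cs using pvPalA.induct with
  | case1 x _s h0 =>
      have h : (pvRmRight (pvRmLeft x)).length = 0 ∨ (pvRmRight (pvRmLeft x)).length = 1 := h0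
      have hclean : pvClean (pvRmRight (pvRmLeft x)) = pvClean x := by
        rw [pvClean_rmRight, pvClean_rmLeft]
      constructor
      · intro _
        rw [← hclean]
        refine pvPalindrome_short _ ?_
        have := pvClean_len_le (pvRmRight (pvRmLeft x))
        omega
      · intro _
        rw [pvPalA]
        show (if (pvRmRight (pvRmLeft x)).length = 0 ∨ (pvRmRight (pvRmLeft x)).length = 1
          then true else _) = true
        rw [if_pos h]
  | case2 x _s h0 he =>
      have h : ¬((pvRmRight (pvRmLeft x)).length = 0 ∨ (pvRmRight (pvRmLeft x)).length = 1) := h0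
      have he' : pvRmRight (pvRmLeft x) = [] := he
      exact absurd (Or.inl (by rw [he']; rfl)) h
  | case3 x _s h0 c t hst0 ih0 =>
      have h : ¬((pvRmRight (pvRmLeft x)).length = 0 ∨ (pvRmRight (pvRmLeft x)).length = 1) := h0
      have hst : pvRmRight (pvRmLeft x) = c :: t := hst0
      have ih : pvPalA ((pvRmRight (pvRmLeft x)).drop 1).dropLast = true ↔
          pvClean ((pvRmRight (pvRmLeft x)).drop 1).dropLast =
            (pvClean ((pvRmRight (pvRmLeft x)).drop 1).dropLast).reverse := ih0
      have ht : t ≠ [] := by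
        intro h0'
        exact h (Or.inr (by rw [hst, h0']; rfl))
      have hyq : (c :: t).getLast (by simp) = t.getLast ht := List.getLast_cons ht
      have hlast? : (pvRmRight (pvRmLeft x)).getLast? = some (t.getLast ht) := by
        rw [hst, List.getLast?_eq_some_getLast (by simp), hyq]
      have hy : PySem.Chars.isalpha (t.getLast ht) = true :=
        pvRmRight_last_alpha (pvRmLeft x) _ hlast?
      have hc : PySem.Chars.isalpha c = true := by
        obtain ⟨r, hr⟩ := pvRmRight_prefix (pvRmLeft x)
        rw [hst] at hr
        exact pvRmLeft_head_alpha x c (t ++ r) (by rw [← hr]; simp)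
      have htdecomp : t.dropLast ++ [t.getLast ht] = t := List.dropLast_append_getLast ht
      have hsdrop : ((pvRmRight (pvRmLeft x)).drop 1).dropLast = t.dropLast := by
        rw [hst]; rfl
      rw [hsdrop] at ih
      have hgetD : t.getLastD c = t.getLast ht := by
        rw [List.getLastD_eq_getLast?, List.getLast?_eq_some_getLast ht]
        rfl
      have hunf : pvPalA x =
          ((PySem.Chars.lowerChar c == PySem.Chars.lowerChar (t.getLastD c))
            && pvPalA t.dropLast) := by
        rw [pvPalA]
        show (if (pvRmRight (pvRmLeft x)).length = 0 ∨ (pvRmRight (pvRmLeft x)).length = 1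
          then true
          else match pvRmRight (pvRmLeft x) with
            | [] => true
            | a :: t =>
              (PySem.Chars.lowerChar a == PySem.Chars.lowerChar (t.getLastD a))
                && pvPalA ((pvRmRight (pvRmLeft x)).drop 1).dropLast) = _
        rw [if_neg h, hsdrop]
        simp only [hst]
      have hcleanx : pvClean x = PySem.Chars.lowerChar c ::
          (pvClean t.dropLast ++ [PySem.Chars.lowerChar (t.getLast ht)]) := by
        rw [← pvClean_rmLeft x, ← pvClean_rmRight (pvRmLeft x), hst,
          pvClean_cons c t hc]
        conv_lhs => rw [← htdecomp]
        rw [pvClean_append]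
        simp [pvClean, List.filter_cons, hy]
      rw [hunf, hgetD, hcleanx, pvPal_cons_concat]
      simp only [Bool.and_eq_true, beq_iff_eq, ih]

-- ===== VERDICT (by name: the statement is the Claim_ definition above) =====
theorem is_string_palindrome_spec : Claim_equal_is_string_palindrome := by
  intro string _
  unfold Spec_is_string_palindrome is_string_palindrome is_string_palindrome_alt
  exact Bool.eq_iff_iff.mpr ((pvMain string.toList).trans (beq_iff_eq).symm)
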